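-- pv_equiv track=rewrite | github.com/diegodfp/python | matrices/sweetCoMatrices.py | calcdia
-- ===== SOURCE A (Python) =====
-- def calcdia(matVtas, matPrecios):
--     fil = len(matVtas)
--     lstTotVtas = [0]*fil
--     for f in range(fil):
--         lstTotVtas[f] = sum(matVtas[f])* matPrecios[f]
--     maxVtas = max(lstTotVtas)
--     prodMaxVtas = lstTotVtas.index(maxVtas) + 1
--     return prodMaxVtas
-- ===== SOURCE B (Python) =====
-- def calcdia(matVtas, matPrecios):
--     best = None
--     bestProd = None
--     for f, fila in enumerate(matVtas):
--         total = sum(fila) * matPrecios[f]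
--         if best is None or total > best:
--             best = total
--             bestProd = f + 1
--     if bestProd is None:
--         raise ValueError("max() arg is an empty sequence")
--     return bestProd
-- ===== Notes on version B (the rewrite author's own statement) =====
-- stated objective: simpler
-- what changed: Single fused pass keeping a running best total and its 1-based index (strict > so the first maximum wins), instead of materialising the totals list, calling max, then rescanning it with .index.
import Mathlib
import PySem

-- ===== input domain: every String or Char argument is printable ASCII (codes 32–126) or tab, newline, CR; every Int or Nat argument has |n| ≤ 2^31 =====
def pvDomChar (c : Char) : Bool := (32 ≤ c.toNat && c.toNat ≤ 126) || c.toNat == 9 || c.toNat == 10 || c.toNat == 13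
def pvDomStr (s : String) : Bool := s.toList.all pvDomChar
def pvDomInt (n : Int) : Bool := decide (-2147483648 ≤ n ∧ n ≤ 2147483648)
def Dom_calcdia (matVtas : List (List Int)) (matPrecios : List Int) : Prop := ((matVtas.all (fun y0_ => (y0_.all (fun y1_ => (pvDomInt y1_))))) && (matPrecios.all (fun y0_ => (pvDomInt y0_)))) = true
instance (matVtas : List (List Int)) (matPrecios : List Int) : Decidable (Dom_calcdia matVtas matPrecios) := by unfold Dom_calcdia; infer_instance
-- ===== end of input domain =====

-- B replaces A's three passes (build totals list, max(), .index()) by one fused pass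
-- keeping the running best total and its 1-based index (strict '>' keeps the first maximum).

-- ===== PORT A =====
def calcdia (matVtas : List (List Int)) (matPrecios : List Int) : Int :=
  let fil : Int := matVtas.length
  let lstTotVtas : List Int :=
    (PySem.List.pyRange 0 fil 1).foldl
      (fun lst f =>
        lst.set f.toNat ((PySem.List.pyGetD matVtas f []).sum * PySem.List.pyGetD matPrecios f 0))
      (List.replicate matVtas.length 0)
  let maxVtas : Int := (PySem.List.max? lstTotVtas (fun y => y)).getD 0
  let prodMaxVtas : Int := (((PySem.List.index? lstTotVtas maxVtas).getD 0 : Nat) : Int) + 1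
  prodMaxVtas

-- ===== PORT B =====
def calcdia_alt (matVtas : List (List Int)) (matPrecios : List Int) : Int :=
  ((PySem.List.enumerate matVtas 0).foldl
      (fun (s : Option Int × Int) p =>
        let total := p.2.sum * PySem.List.pyGetD matPrecios p.1 0
        match s.1 with
        | none => (some total, p.1 + 1)
        | some best => if total > best then (some total, p.1 + 1) else s)
      (none, 0)).2

-- ===== PRECONDITION & SPEC =====
-- Pre_ excludes exactly the inputs where the Python A raises: the empty matrix
-- (max([]) raises ValueError) and a price list shorter than the matrix (IndexError).
def Pre_calcdia (matVtas : List (List Int)) (matPrecios : List Int) : Prop :=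
  matVtas ≠ [] ∧ matVtas.length ≤ matPrecios.length
instance (matVtas : List (List Int)) (matPrecios : List Int) : Decidable (Pre_calcdia matVtas matPrecios) := by unfold Pre_calcdia; infer_instance

def pvWitness_calcdia : List (List Int) × List Int := ([[1, 2], [3]], [2, 5])

def Spec_calcdia (matVtas : List (List Int)) (matPrecios : List Int) (out : Int) : Prop := out = calcdia_alt matVtas matPrecios
instance (matVtas : List (List Int)) (matPrecios : List Int) (out : Int) : Decidable (Spec_calcdia matVtas matPrecios out) := by unfold Spec_calcdia; infer_instance

-- ===== CLAIM (what is proved, stated in full; the proofs are below) =====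
def Claim_equal_calcdia : Prop := ∀ (matVtas : List (List Int)) (matPrecios : List Int), Dom_calcdia matVtas matPrecios → Pre_calcdia matVtas matPrecios → Spec_calcdia matVtas matPrecios (calcdia matVtas matPrecios)

-- ===== LEMMAS AND PROOFS =====

-- the per-row total as a function of the row index
def pvTot (matVtas : List (List Int)) (matPrecios : List Int) (f : Int) : Int :=
  (PySem.List.pyGetD matVtas f []).sum * PySem.List.pyGetD matPrecios f 0

-- B's loop step, on (index, total) pairs
def pvStep (s : Option Int × Int) (p : Int × Int) : Option Int × Int :=
  match s.1 with
  | none => (some p.2, p.1 + 1)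
  | some best => if p.2 > best then (some p.2, p.1 + 1) else s

-- recursive presentation of B's index tracking (k = absolute index of the head)
def pvBi (b k j : Int) : List Int → Int
  | [] => j
  | x :: t => if x > b then pvBi x (k + 1) (k + 1) t else pvBi b (k + 1) j t

theorem pv_le_foldl_max : ∀ (t : List Int) (a : Int), a ≤ t.foldl max a := by
  intro t
  induction t with
  | nil => intro a; simp [List.foldl]
  | cons x t ih =>
    intro a
    calc a ≤ max a x := le_max_left _ _
    _ ≤ (x :: t).foldl max a := ih (max a x)

theorem pv_foldl_max_mono : ∀ (t : List Int) (a b : Int), a ≤ b → t.foldl max a ≤ t.foldl max b := by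
  intro t
  induction t with
  | nil => intro a b h; simpa using h
  | cons x t ih => intro a b h; exact ih _ _ (max_le_max h le_rfl)

theorem pv_foldl_max_mem : ∀ (t : List Int) (b : Int), t.foldl max b = b ∨ t.foldl max b ∈ t := by
  intro t
  induction t with
  | nil => intro b; left; rfl
  | cons x t ih =>
    intro b
    rcases ih (max b x) with h | h
    · rw [List.foldl_cons, h]
      rcases le_total b x with hbx | hxb
      · right; simp [max_eq_right hbx]
      · left; simp [max_eq_left hxb]
    · right; exact List.mem_cons_of_mem _ h

theorem pv_index?_of_mem : ∀ (t : List Int) (v : Int), v ∈ t → PySem.List.index? t v = some (t.idxOf v) := by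
  intro t
  induction t with
  | nil => intro v hv; cases hv
  | cons x t ih =>
    intro v hv
    by_cases hx : x = v
    · subst hx; rw [PySem.List.index?_cons_self]; simp
    · have hvt : v ∈ t := by
        rcases List.mem_cons.1 hv with h | h
        · exact absurd h.symm hx
        · exact h
      rw [PySem.List.index?_cons_of_ne t hx, ih v hvt, List.idxOf_cons_ne t hx]
      simp

theorem pvBi_noimprove : ∀ (t : List Int) (b k j : Int), t.foldl max b ≤ b → pvBi b k j t = j := by
  intro t
  induction t with
  | nil => intro b k j _; rfl
  | cons x t ih =>
    intro b k j h
    have hx : x ≤ b := by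
      have h1 : max b x ≤ t.foldl max (max b x) := pv_le_foldl_max t (max b x)
      have h' : t.foldl max (max b x) ≤ b := h
      exact le_trans (le_trans (le_max_right b x) h1) h' 
    have hxb : ¬ x > b := not_lt.2 hx
    rw [pvBi, if_neg hxb]
    apply ih
    have : t.foldl max b ≤ t.foldl max (max b x) := pv_foldl_max_mono t _ _ (le_max_left b x)
    exact le_trans this h

theorem pvBi_improve : ∀ (t : List Int) (b k j : Int), b < t.foldl max b →
    pvBi b k j t = k + (t.idxOf (t.foldl max b) : Int) + 1 := by
  intro t
  induction t with
  | nil => intro b k j h; exact absurd h (lt_irrefl b)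
  | cons x t ih =>
    intro b k j h
    have hfold : (x :: t).foldl max b = t.foldl max (max b x) := rfl
    by_cases hx : x > b
    · have hmax : max b x = x := max_eq_right (le_of_lt hx)
      have hM : (x :: t).foldl max b = t.foldl max x := by rw [hfold, hmax]
      rw [pvBi, if_pos hx, hM]
      by_cases h2 : x < t.foldl max x
      · have hxne : x ≠ t.foldl max x := ne_of_lt h2
        rw [ih x (k + 1) (k + 1) h2, List.idxOf_cons_ne t hxne]
        push_cast [Nat.succ_eq_add_one]
        ring
      · have hMx : t.foldl max x = x := le_antisymm (not_lt.1 h2) (pv_le_foldl_max t x)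
        rw [pvBi_noimprove t x (k + 1) (k + 1) (le_of_eq hMx), hMx, List.idxOf_cons_self]
        simp
    · have hmax : max b x = b := max_eq_left (not_lt.1 hx)
      have hM : (x :: t).foldl max b = t.foldl max b := by rw [hfold, hmax]
      rw [pvBi, if_neg hx, hM]
      have hb : b < t.foldl max b := by rw [← hM]; exact h
      have hxne : x ≠ t.foldl max b := ne_of_lt (lt_of_le_of_lt (not_lt.1 hx) hb)
      rw [ih b (k + 1) j hb, List.idxOf_cons_ne t hxne]
      push_cast [Nat.succ_eq_add_one]
      ring

theorem pv_fold_enum_eq_bi : ∀ (t : List Int) (k b j : Int),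
    ((PySem.List.enumerate t k).foldl pvStep (some b, j)).2 = pvBi b k j t := by
  intro t
  induction t with
  | nil => intro k b j; simp [PySem.List.enumerate_nil, pvBi]
  | cons x t ih =>
    intro k b j
    rw [PySem.List.enumerate_cons, List.foldl_cons]
    by_cases hx : x > b
    · simp only [pvStep, pvBi]
      rw [if_pos hx, if_pos hx]
      exact ih (k + 1) x (k + 1)
    · simp only [pvStep, pvBi]
      rw [if_neg hx, if_neg hx]
      exact ih (k + 1) b j

-- B's whole loop on a nonempty totals list equals A's index-of-first-max formula
theorem pv_main : ∀ (L : List Int), L ≠ [] →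
    (((PySem.List.index? L ((PySem.List.max? L (fun y => y)).getD 0)).getD 0 : Nat) : Int) + 1
      = ((PySem.List.enumerate L 0).foldl pvStep (none, 0)).2 := by
  intro L hL
  match L, hL with
  | x :: t, _ =>
    have hmax : PySem.List.max? (x :: t) (fun y => y) = some (t.foldl max x) :=
      PySem.List.max?_id_cons x t
    rw [PySem.List.enumerate_cons, List.foldl_cons]
    have hstep : pvStep (none, 0) (0, x) = (some x, 1) := rfl
    show _ = ((PySem.List.enumerate t 1).foldl pvStep (pvStep (none, 0) (0, x))).2
    rw [hstep, pv_fold_enum_eq_bi t 1 x 1]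
    rw [hmax]
    by_cases h2 : x < t.foldl max x
    · -- max lives in the tail
      have hM : t.foldl max x ∈ t := by
        rcases pv_foldl_max_mem t x with h | h
        · exact absurd h (ne_of_gt h2)
        · exact h
      have hxne : x ≠ t.foldl max x := ne_of_lt h2
      rw [pvBi_improve t x 1 1 h2]
      rw [Option.getD_some, PySem.List.index?_cons_of_ne t hxne, pv_index?_of_mem t _ hM]
      simp only [Option.map_some, Option.getD_some]
      push_cast
      ring
    · -- head is the (first) max
      have hMx : t.foldl max x = x := le_antisymm (not_lt.1 h2) (pv_le_foldl_max t x)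
      rw [pvBi_noimprove t x 1 1 (le_of_eq hMx), hMx]
      rw [Option.getD_some, PySem.List.index?_cons_self]
      simp

-- A's imperative list build equals the totals-by-index map
theorem pv_setfold (g : Int → Int) : ∀ (n : Nat) (a b : Int) (acc : List Int),
    (b - a).toNat = n → 0 ≤ a →
    ∀ (k : Nat),
      ((PySem.List.pyRange a b 1).foldl (fun l f => l.set f.toNat (g f)) acc)[k]? =
        if a ≤ (k : Int) ∧ (k : Int) < b ∧ k < acc.length then some (g k) else acc[k]? := by
  intro n
  induction n with
  | zero =>
    intro a b acc hn ha k
    have hba : b ≤ a := by omega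
    rw [PySem.List.pyRange_one_eq_nil hba]
    simp only [List.foldl_nil]
    rw [if_neg (by omega)]
  | succ m ih =>
    intro a b acc hn ha k
    have hab : a < b := by omega
    rw [PySem.List.pyRange_one_cons hab, List.foldl_cons]
    have hlen : (acc.set a.toNat (g a)).length = acc.length := by simp
    rw [ih (a + 1) b (acc.set a.toNat (g a)) (by omega) (by omega) k]
    rw [hlen]
    by_cases hk : (k : Int) = a
    · have hka : k = a.toNat := by omega
      rw [if_neg (by omega)]
      by_cases hkl : k < acc.length
      · rw [if_pos (by omega), hka, List.getElem?_set_self (by omega)]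
        congr 1
        rw [← hka, hk]
      · rw [if_neg (by omega), List.getElem?_set, if_pos (by omega), if_neg (by omega)]
        exact (List.getElem?_eq_none (by omega)).symm
    · have hset : (acc.set a.toNat (g a))[k]? = acc[k]? := by
        rw [List.getElem?_set, if_neg (by omega)]
      rw [hset]
      by_cases hin : a ≤ (k : Int) ∧ (k : Int) < b ∧ k < acc.length
      · rw [if_pos (by omega), if_pos hin]
      · rw [if_neg (by omega), if_neg hin]

theorem pv_build_eq (g : Int → Int) (n : Nat) :
    (PySem.List.pyRange 0 (n : Int) 1).foldl (fun l f => l.set f.toNat (g f)) (List.replicate n 0) =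
      (PySem.List.pyRange 0 (n : Int) 1).map g := by
  apply List.ext_getElem?
  intro k
  rw [pv_setfold g n 0 (n : Int) (List.replicate n 0) (by omega) (by omega) k]
  by_cases hk : k < n
  · rw [if_pos (by simp; omega)]
    rw [PySem.List.getElem?_map_pyRange_zero g n k hk]
  · rw [if_neg (by simp; omega)]
    have h1 : (List.replicate n (0 : Int))[k]? = none := by
      rw [List.getElem?_eq_none]; simpa using Nat.not_lt.1 hk
    have h2 : ((PySem.List.pyRange 0 (n : Int) 1).map g)[k]? = none := by
      rw [List.getElem?_eq_none]
      simp [PySem.List.length_pyRange_one]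
      omega
    rw [h1, h2]

-- B's loop over the enumerated matrix is pvStep over the enumerated totals list
theorem pv_alt_as_enum (matVtas : List (List Int)) (matPrecios : List Int) :
    calcdia_alt matVtas matPrecios =
      ((PySem.List.enumerate
          ((PySem.List.pyRange 0 (matVtas.length : Int) 1).map (pvTot matVtas matPrecios)) 0).foldl
        pvStep (none, 0)).2 := by
  unfold calcdia_alt
  rw [PySem.List.enumerate_eq_map_pyRange matVtas ([] : List Int), List.foldl_map,
      PySem.List.enumerate_eq_map_pyRange
        ((PySem.List.pyRange 0 (matVtas.length : Int) 1).map (pvTot matVtas matPrecios)) (0 : Int),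
      List.foldl_map]
  have hlen2 : PySem.List.len ((PySem.List.pyRange 0 (matVtas.length : Int) 1).map (pvTot matVtas matPrecios))
      = PySem.List.len matVtas := by
    simp [PySem.List.length_pyRange_one]
  rw [hlen2]
  congr 1
  apply PySem.List.foldl_congr_mem
  intro acc f hf
  have hf' : 0 ≤ f ∧ f < (matVtas.length : Int) := by
    have h := PySem.List.mem_pyRange_one.1 hf
    constructor
    · exact h.1
    · simpa [PySem.List.len_eq] using h.2
  rw [PySem.List.pyGetD_map_pyRange_of_nonneg (pvTot matVtas matPrecios) _ f 0 hf'.1 hf'.2]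
  rfl

-- ===== VERDICT (by name: the statement is the Claim_ definition above) =====
theorem calcdia_spec : Claim_equal_calcdia := by
  intro matVtas matPrecios _ hpre
  unfold Spec_calcdia
  rw [pv_alt_as_enum matVtas matPrecios]
  simp only [calcdia]
  have hb := pv_build_eq (pvTot matVtas matPrecios) matVtas.length
  simp only [pvTot] at hb
  rw [hb]
  have hne : (PySem.List.pyRange 0 (matVtas.length : Int) 1).map (pvTot matVtas matPrecios) ≠ [] := by
    intro h
    have := congrArg List.length h
    simp [PySem.List.length_pyRange_one] at this
    exact hpre.1 this
  exact pv_main _ hne
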